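-- pv_equiv track=rewrite | github.com/rdeits/cryptics | cryptic_utils.py | valid_intermediate
-- ===== SOURCE A (Python) =====
-- def valid_intermediate(kinds):
--     if len(kinds) < 2:
--         return True
--     if ('_l' in kinds[0] or kinds[0] == 'ins'):
--         return False
--     if kinds[0] == 'd':
--         if '_l' in kinds[1] or kinds[1] == 'ins':
--             return False
--     if any('_r' in kinds[i] and ('_l' in kinds[i + 1] or kinds[i + 1] == 'ins') for i in range(len(kinds) - 1)):
--         return False
--     if any(kinds[i] == 'ins' and '_r' in kinds[i + 1] for i in range(len(kinds) - 1)):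
--         return False
--     if kinds[-1] == 'd':
--         if '_r' in kinds[-2] or kinds[-2] == 'ins':
--             return False
--     if kinds.count('ana_l') + kinds.count('ana_r') > 1:
--         return False
--     if any('_r' in kinds[i] and kinds[i + 1] != 'lit' for i in range(len(kinds) - 1)):
--         return False
--     if any(kinds[i] != 'lit' and '_l' in kinds[i + 1] for i in range(len(kinds) - 1)):
--         return False
--     if any('_r' in kinds[i] and '_l' in kinds[i + 2] for i in range(len(kinds) - 2)):
--         return False
--     if any((('_r' in kinds[i] or kinds[i] == 'ins') and kinds[i + 1] == 'null') or (('_l' in kinds[i + 1] or kinds[i + 1] == 'ins') and kinds[i] == 'null') for i in range(len(kinds) - 1)):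
--         return False
--     return True
-- ===== SOURCE B (Python) =====
-- # Token-stream approach: classify each kind into a small finite alphabet once,
-- # wrap the token list in '^'/'$' sentinels, and judge every width-3 window with
-- # one uniform predicate; the ana limit becomes a count over tokens.
--
-- def _tok(k):
--     if k == 'ins':
--         return 'INS'
--     if k == 'lit':
--         return 'LIT'
--     if k == 'null':
--         return 'NULL'
--     if k == 'd':
--         return 'D'
--     if k == 'ana_l':
--         return 'AL'
--     if k == 'ana_r':
--         return 'AR'
--     if '_l' in k and '_r' in k:
--         return 'LR'
--     if '_l' in k:
--         return 'L'
--     if '_r' in k: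
--         return 'R'
--     return 'O'
--
--
-- def _has_l(t):
--     return t in ('L', 'LR', 'AL')
--
--
-- def _has_r(t):
--     return t in ('R', 'LR', 'AR')
--
--
-- def _bad(a, b, c):
--     # a = previous token (or '^'), b = current token, c = next token (or '$')
--     if a == '^' and (_has_l(b) or b == 'INS' or (b == 'D' and c == 'INS')):
--         return True
--     if c == '$':
--         return b == 'D' and a == 'INS'
--     if _has_r(b) and c != 'LIT':
--         return True
--     if b != 'LIT' and _has_l(c):
--         return True
--     if b == 'INS' and (_has_r(c) or c == 'NULL'):
--         return True
--     if b == 'NULL' and c == 'INS':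
--         return True
--     if _has_r(a) and _has_l(c):
--         return True
--     return False
--
--
-- def valid_intermediate(kinds):
--     if len(kinds) < 2:
--         return True
--     toks = [_tok(k) for k in kinds]
--     if toks.count('AL') + toks.count('AR') > 1:
--         return False
--     return not any(_bad(a, b, c)
--                    for a, b, c in zip(['^'] + toks, toks, toks[1:] + ['$']))
-- ===== Notes on version B (the rewrite author's own statement) =====
-- stated objective: alternative
-- what changed: A's eight rule-specific scans over string contents and endpoint special cases are replaced by a token-stream design: each kind is classified once into a 10-symbol alphabet, the token list is wrapped in '^'/'$' sentinels, and a single uniform width-3 window predicate over the sentinel stream enforces all adjacency and boundary rules (several of A's rules become redundant at the token level); the ana limit is a count of AL/AR tokens.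
import Mathlib
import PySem

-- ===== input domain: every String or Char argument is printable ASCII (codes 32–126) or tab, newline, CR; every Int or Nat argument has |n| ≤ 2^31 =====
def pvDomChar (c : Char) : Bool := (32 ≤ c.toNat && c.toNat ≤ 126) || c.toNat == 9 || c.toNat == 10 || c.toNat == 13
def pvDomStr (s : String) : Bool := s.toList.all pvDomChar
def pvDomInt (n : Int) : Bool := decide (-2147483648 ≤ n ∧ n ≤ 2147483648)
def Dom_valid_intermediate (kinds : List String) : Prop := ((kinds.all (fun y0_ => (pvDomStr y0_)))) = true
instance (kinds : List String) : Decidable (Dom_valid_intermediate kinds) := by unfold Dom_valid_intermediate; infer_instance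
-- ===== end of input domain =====

-- B replaces A's eight rule-specific scans by a tokenize-then-slide design:
-- classify each kind into a finite alphabet, add '^'/'$' sentinels, judge each
-- width-3 window with one predicate, count AL/AR tokens (objective: alternative).


-- ===== PORT A =====
def valid_intermediate (kinds : List String) : Bool :=
  let n : Int := kinds.length
  if n < 2 then true
  else if PySem.Str.isIn "_l" (PySem.List.pyGetD kinds 0 "") || PySem.List.pyGetD kinds 0 "" == "ins" then false
  else if PySem.List.pyGetD kinds 0 "" == "d" &&
          (PySem.Str.isIn "_l" (PySem.List.pyGetD kinds 1 "") || PySem.List.pyGetD kinds 1 "" == "ins") then false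
  else if (PySem.List.pyRange 0 (n - 1) 1).any (fun i =>
      PySem.Str.isIn "_r" (PySem.List.pyGetD kinds i "") &&
      (PySem.Str.isIn "_l" (PySem.List.pyGetD kinds (i + 1) "") || PySem.List.pyGetD kinds (i + 1) "" == "ins")) then false
  else if (PySem.List.pyRange 0 (n - 1) 1).any (fun i =>
      PySem.List.pyGetD kinds i "" == "ins" && PySem.Str.isIn "_r" (PySem.List.pyGetD kinds (i + 1) "")) then false
  else if PySem.List.pyGetD kinds (-1) "" == "d" &&
          (PySem.Str.isIn "_r" (PySem.List.pyGetD kinds (-2) "") || PySem.List.pyGetD kinds (-2) "" == "ins") then false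
  else if 1 < PySem.List.count kinds "ana_l" + PySem.List.count kinds "ana_r" then false
  else if (PySem.List.pyRange 0 (n - 1) 1).any (fun i =>
      PySem.Str.isIn "_r" (PySem.List.pyGetD kinds i "") && PySem.List.pyGetD kinds (i + 1) "" != "lit") then false
  else if (PySem.List.pyRange 0 (n - 1) 1).any (fun i =>
      PySem.List.pyGetD kinds i "" != "lit" && PySem.Str.isIn "_l" (PySem.List.pyGetD kinds (i + 1) "")) then false
  else if (PySem.List.pyRange 0 (n - 2) 1).any (fun i =>
      PySem.Str.isIn "_r" (PySem.List.pyGetD kinds i "") && PySem.Str.isIn "_l" (PySem.List.pyGetD kinds (i + 2) "")) then false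
  else if (PySem.List.pyRange 0 (n - 1) 1).any (fun i =>
      ((PySem.Str.isIn "_r" (PySem.List.pyGetD kinds i "") || PySem.List.pyGetD kinds i "" == "ins") &&
        PySem.List.pyGetD kinds (i + 1) "" == "null") ||
      ((PySem.Str.isIn "_l" (PySem.List.pyGetD kinds (i + 1) "") || PySem.List.pyGetD kinds (i + 1) "" == "ins") &&
        PySem.List.pyGetD kinds i "" == "null")) then false
  else true

-- ===== PORT B =====
-- token classification (Source B's _tok)
def pvTok (k : String) : String :=
  if k == "ins" then "INS"
  else if k == "lit" then "LIT"
  else if k == "null" then "NULL"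
  else if k == "d" then "D"
  else if k == "ana_l" then "AL"
  else if k == "ana_r" then "AR"
  else if PySem.Str.isIn "_l" k && PySem.Str.isIn "_r" k then "LR"
  else if PySem.Str.isIn "_l" k then "L"
  else if PySem.Str.isIn "_r" k then "R"
  else "O"

def pvHasL (t : String) : Bool := t == "L" || t == "LR" || t == "AL"
def pvHasR (t : String) : Bool := t == "R" || t == "LR" || t == "AR"

-- the uniform width-3 window predicate (Source B's _bad)
def pvBadWin (a b c : String) : Bool :=
  if a == "^" && (pvHasL b || b == "INS" || (b == "D" && c == "INS")) then true
  else if c == "$" then b == "D" && a == "INS"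
  else if pvHasR b && c != "LIT" then true
  else if b != "LIT" && pvHasL c then true
  else if b == "INS" && (pvHasR c || c == "NULL") then true
  else if b == "NULL" && c == "INS" then true
  else if pvHasR a && pvHasL c then true
  else false

def valid_intermediate_alt (kinds : List String) : Bool :=
  if kinds.length < 2 then true
  else
    let toks := kinds.map pvTok
    if 1 < PySem.List.count toks "AL" + PySem.List.count toks "AR" then false
    else !((("^" :: toks).zip toks).zip (toks.drop 1 ++ ["$"])).any
           (fun w => pvBadWin w.1.1 w.1.2 w.2)

-- ===== PRECONDITION & SPEC =====
def Spec_valid_intermediate (kinds : List String) (out : Bool) : Prop := out = valid_intermediate_alt kinds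
instance (kinds : List String) (out : Bool) : Decidable (Spec_valid_intermediate kinds out) := by unfold Spec_valid_intermediate; infer_instance

-- ===== CLAIM (what is proved, stated in full; the proofs are below) =====
def Claim_equal_valid_intermediate : Prop := ∀ (kinds : List String), Dom_valid_intermediate kinds → Spec_valid_intermediate kinds (valid_intermediate kinds)

-- ===== LEMMAS AND PROOFS =====

-- string-level shorthands used only by the proofs
def pvHl (k : String) : Bool := PySem.Str.isIn "_l" k
def pvHr (k : String) : Bool := PySem.Str.isIn "_r" k

-- the fused adjacent-pair rule at string level
def pvPairBad (a b : String) : Bool :=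
  (pvHr a && b != "lit") || (a != "lit" && pvHl b) ||
  (a == "ins" && (pvHr b || b == "null")) || (a == "null" && b == "ins")

-- an early-return chain 'if c: return False' is a conjunction of negations
lemma if_chain (p : Prop) [Decidable p] (e : Bool) :
    (if p then false else e) = (!(decide p) && e) := by by_cases h : p <;> simp [h]

-- tokens never collide with the sentinels
lemma tok_ne_hat (k : String) : (pvTok k == "^") = false := by
  unfold pvTok; split_ifs <;> decide

lemma tok_ne_dollar (k : String) : (pvTok k == "$") = false := by
  unfold pvTok; split_ifs <;> decide

-- token reflection: each token feature mirrors the string-level test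
lemma tok_hasL (k : String) : pvHasL (pvTok k) = pvHl k := by
  unfold pvTok pvHasL pvHl; split_ifs <;> simp_all [beq_iff_eq] <;> (subst_vars; decide)

lemma tok_hasR (k : String) : pvHasR (pvTok k) = pvHr k := by
  unfold pvTok pvHasR pvHr; split_ifs <;> simp_all [beq_iff_eq] <;> (subst_vars; decide)

lemma tok_INS (k : String) : (pvTok k == "INS") = (k == "ins") := by
  unfold pvTok; split_ifs <;> simp_all [beq_iff_eq] <;> (subst_vars; decide)

lemma tok_LIT (k : String) : (pvTok k == "LIT") = (k == "lit") := by
  unfold pvTok; split_ifs <;> simp_all [beq_iff_eq] <;> (subst_vars; decide)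

lemma tok_NULL (k : String) : (pvTok k == "NULL") = (k == "null") := by
  unfold pvTok; split_ifs <;> simp_all [beq_iff_eq] <;> (subst_vars; decide)

lemma tok_D (k : String) : (pvTok k == "D") = (k == "d") := by
  unfold pvTok; split_ifs <;> simp_all [beq_iff_eq] <;> (subst_vars; decide)

lemma tok_AL (k : String) : (pvTok k == "AL") = (k == "ana_l") := by
  unfold pvTok; split_ifs <;> simp_all [beq_iff_eq] <;> (subst_vars; decide)

lemma tok_AR (k : String) : (pvTok k == "AR") = (k == "ana_r") := by
  unfold pvTok; split_ifs <;> simp_all [beq_iff_eq] <;> (subst_vars; decide)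

-- counting tokens = counting the original strings
lemma count_tok_AL (kinds : List String) :
    PySem.List.count (kinds.map pvTok) "AL" = PySem.List.count kinds "ana_l" := by
  induction kinds with
  | nil => rfl
  | cons x t ih =>
    simp only [PySem.List.count_eq, List.map_cons, List.count_cons] at *
    rw [ih]
    have := tok_AL x
    by_cases h : x = "ana_l" <;> simp_all

lemma count_tok_AR (kinds : List String) :
    PySem.List.count (kinds.map pvTok) "AR" = PySem.List.count kinds "ana_r" := by
  induction kinds with
  | nil => rfl
  | cons x t ih =>
    simp only [PySem.List.count_eq, List.map_cons, List.count_cons] at *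
    rw [ih]
    have := tok_AR x
    by_cases h : x = "ana_r" <;> simp_all

-- the sentinel window list, characterised by index
lemma win_len (ts : List String) :
    ((("^" :: ts).zip ts).zip (ts.drop 1 ++ ["$"])).length = ts.length := by
  simp [List.length_zip]; omega

lemma win_get (ts : List String) (j : Nat) (hj : j < ts.length) :
    ((("^" :: ts).zip ts).zip (ts.drop 1 ++ ["$"]))[j]'(by rw [win_len]; exact hj) =
    ((if j = 0 then "^" else ts.getD (j - 1) "", ts.getD j ""),
      if j + 1 < ts.length then ts.getD (j + 1) "" else "$") := by
  rw [List.getElem_zip, List.getElem_zip]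
  refine congrArg₂ Prod.mk (congrArg₂ Prod.mk ?_ ?_) ?_
  · cases j with
    | zero => simp
    | succ i =>
      simp only [List.getElem_cons_succ, Nat.add_sub_cancel, if_neg (Nat.succ_ne_zero i)]
      rw [List.getD_eq_getElem ts "" (by omega)]
  · rw [List.getD_eq_getElem ts "" hj]
  · by_cases h : j + 1 < ts.length
    · rw [List.getElem_append_left (by simp; omega), List.getElem_drop]
      rw [if_pos h, List.getD_eq_getElem ts "" (by omega)]
      congr 1
      omega
    · rw [List.getElem_append_right (by simp; omega)]
      simp [h]

lemma any_wins (P : String → String → String → Bool) (ts : List String) :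
    (((("^" :: ts).zip ts).zip (ts.drop 1 ++ ["$"])).any
        (fun w => P w.1.1 w.1.2 w.2)) = true ↔
    ∃ j : Nat, j < ts.length ∧
      P (if j = 0 then "^" else ts.getD (j - 1) "") (ts.getD j "")
        (if j + 1 < ts.length then ts.getD (j + 1) "" else "$") = true := by
  rw [List.any_eq_true]
  constructor
  · rintro ⟨w, hmem, hP⟩
    rw [List.mem_iff_getElem] at hmem
    obtain ⟨j, hj, hEq⟩ := hmem
    have hj' : j < ts.length := by rwa [win_len] at hj
    refine ⟨j, hj', ?_⟩
    rw [win_get ts j hj'] at hEq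
    rw [← hEq] at hP
    exact hP
  · rintro ⟨j, hj, hP⟩
    refine ⟨_, List.getElem_mem (by rw [win_len]; exact hj), ?_⟩
    rw [win_get ts j hj]
    exact hP

lemma pvIteOr (b e : Bool) : (if b = true then true else e) = (b || e) := by
  cases b <;> simp

lemma getD_map_tok (kinds : List String) (i : Nat) (h : i < kinds.length) :
    (kinds.map pvTok).getD i "" = pvTok (kinds.getD i "") := by
  rw [List.getD_eq_getElem _ "" (by simpa using h), List.getD_eq_getElem kinds "" h,
      List.getElem_map]

lemma winBad_at (kinds : List String) (hn : 2 ≤ kinds.length) (j : Nat) (hj : j < kinds.length) :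
    pvBadWin (if j = 0 then "^" else (kinds.map pvTok).getD (j - 1) "")
             ((kinds.map pvTok).getD j "")
             (if j + 1 < kinds.length then (kinds.map pvTok).getD (j + 1) "" else "$") =
    (if j = 0 then
      (pvHl (kinds.getD 0 "") || kinds.getD 0 "" == "ins" ||
        (kinds.getD 0 "" == "d" && kinds.getD 1 "" == "ins")) ||
      pvPairBad (kinds.getD 0 "") (kinds.getD 1 "")
    else if j + 1 < kinds.length then
      pvPairBad (kinds.getD j "") (kinds.getD (j + 1) "") ||
      (pvHr (kinds.getD (j - 1) "") && pvHl (kinds.getD (j + 1) ""))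
    else
      kinds.getD j "" == "d" && kinds.getD (j - 1) "" == "ins") := by
  by_cases h0 : j = 0
  · subst h0
    have h1 : 0 + 1 < kinds.length := by omega
    rw [if_pos rfl, if_pos rfl, if_pos h1, getD_map_tok kinds 0 (by omega),
        getD_map_tok kinds 1 (by omega)]
    unfold pvBadWin
    rw [tok_ne_dollar]
    simp only [pvIteOr, tok_hasL, tok_hasR, tok_INS, tok_NULL, tok_D,
      beq_self_eq_true, Bool.true_and]
    have hhr : pvHasR "^" = false := by decide
    simp only [hhr, Bool.false_and, Bool.or_false]
    unfold pvPairBad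
    simp only [Bool.false_eq_true, if_false, bne, tok_LIT, Bool.or_assoc]
  · by_cases h2 : j + 1 < kinds.length
    · rw [if_neg h0, if_neg h0, if_pos h2, if_pos h2, getD_map_tok kinds (j - 1) (by omega),
          getD_map_tok kinds j hj, getD_map_tok kinds (j + 1) (by omega)]
      unfold pvBadWin
      rw [tok_ne_hat, tok_ne_dollar]
      simp only [pvIteOr, tok_hasL, tok_hasR, tok_INS, tok_NULL, tok_D,
        Bool.false_and, if_false, Bool.if_false_left, Bool.false_or, Bool.or_false]
      unfold pvPairBad
      simp only [Bool.false_eq_true, if_false, bne, tok_LIT, Bool.or_assoc]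
    · rw [if_neg h0, if_neg h0, if_neg h2, if_neg h2, getD_map_tok kinds (j - 1) (by omega),
          getD_map_tok kinds j hj]
      unfold pvBadWin
      rw [tok_ne_hat]
      simp only [Bool.false_and, if_false, if_pos rfl, tok_INS, tok_D]
      simp [tok_D, tok_INS]

-- A's five adjacent-pair rules fuse pointwise into pvPairBad
lemma pair_fused (a b : String) :
    ((pvHr a && (pvHl b || b == "ins")) ||
     (a == "ins" && pvHr b) ||
     (pvHr a && b != "lit") ||
     (a != "lit" && pvHl b) ||
     (((pvHr a || a == "ins") && b == "null") || ((pvHl b || b == "ins") && a == "null"))) =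
    pvPairBad a b := by
  have c1 : PySem.Chars.isIn ['_', 'l'] ['l', 'i', 't'] = false := by decide
  have c2 : PySem.Chars.isIn ['_', 'r'] ['l', 'i', 't'] = false := by decide
  have c3 : PySem.Chars.isIn ['_', 'l'] ['i', 'n', 's'] = false := by decide
  have c4 : PySem.Chars.isIn ['_', 'r'] ['i', 'n', 's'] = false := by decide
  have c5 : PySem.Chars.isIn ['_', 'l'] ['n', 'u', 'l', 'l'] = false := by decide
  have c6 : PySem.Chars.isIn ['_', 'r'] ['n', 'u', 'l', 'l'] = false := by decide
  unfold pvPairBad pvHl pvHr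
  by_cases hb : b = "lit" <;> by_cases ha1 : a = "lit" <;> by_cases ha2 : a = "ins" <;>
    by_cases ha3 : a = "null" <;> by_cases hbi : b = "ins" <;> by_cases hbn : b = "null" <;>
    simp_all [bne] <;>
    cases hra : PySem.Str.isIn "_r" a <;> cases hlb : PySem.Str.isIn "_l" b <;>
    cases hrb : PySem.Str.isIn "_r" b <;> simp_all <;>
    simp [beq_eq_false_iff_ne.mpr hb, beq_eq_false_iff_ne.mpr ha1, beq_eq_false_iff_ne.mpr ha2,
      beq_eq_false_iff_ne.mpr ha3, beq_eq_false_iff_ne.mpr hbi, beq_eq_false_iff_ne.mpr hbn]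

lemma pair_fused_iff (a b : String) :
    ((pvHr a && (pvHl b || b == "ins")) = true ∨
     (a == "ins" && pvHr b) = true ∨
     (pvHr a && b != "lit") = true ∨
     (a != "lit" && pvHl b) = true ∨
     (((pvHr a || a == "ins") && b == "null") || ((pvHl b || b == "ins") && a == "null")) = true) ↔
    pvPairBad a b = true := by
  rw [← pair_fused]
  simp [Bool.or_eq_true, or_assoc]

lemma any1_idx (kinds : List String) (f : String → String → Bool) :
    (((PySem.List.pyRange 0 ((kinds.length : Int) - 1) 1).any fun i =>
        f (PySem.List.pyGetD kinds i "") (PySem.List.pyGetD kinds (i + 1) "")) = true) ↔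
    ∃ j : Nat, j + 1 < kinds.length ∧ f (kinds.getD j "") (kinds.getD (j + 1) "") = true := by
  simp only [List.any_eq_true, PySem.List.mem_pyRange_one]
  constructor
  · rintro ⟨i, ⟨h0, h1⟩, hf⟩
    refine ⟨i.toNat, by omega, ?_⟩
    rw [PySem.List.pyGetD_eq_getElem kinds "" h0 (by omega),
        PySem.List.pyGetD_eq_getElem kinds "" (by omega) (by omega)] at hf
    simp only [show (i + 1).toNat = i.toNat + 1 from by omega] at hf
    rw [List.getD_eq_getElem kinds "" (by omega), List.getD_eq_getElem kinds "" (by omega)]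
    exact hf
  · rintro ⟨j, hj, hf⟩
    refine ⟨(j : Int), ⟨by omega, by omega⟩, ?_⟩
    rw [PySem.List.pyGetD_eq_getElem kinds "" (by omega) (by omega),
        PySem.List.pyGetD_eq_getElem kinds "" (by omega) (by omega)]
    simp only [show ((j : Int)).toNat = j from by omega,
      show ((j : Int) + 1).toNat = j + 1 from by omega]
    rw [List.getD_eq_getElem kinds "" (by omega), List.getD_eq_getElem kinds "" (by omega)] at hf
    exact hf

lemma any2_idx (kinds : List String) (f : String → String → Bool) :
    (((PySem.List.pyRange 0 ((kinds.length : Int) - 2) 1).any fun i =>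
        f (PySem.List.pyGetD kinds i "") (PySem.List.pyGetD kinds (i + 2) "")) = true) ↔
    ∃ j : Nat, j + 2 < kinds.length ∧ f (kinds.getD j "") (kinds.getD (j + 2) "") = true := by
  simp only [List.any_eq_true, PySem.List.mem_pyRange_one]
  constructor
  · rintro ⟨i, ⟨h0, h1⟩, hf⟩
    refine ⟨i.toNat, by omega, ?_⟩
    rw [PySem.List.pyGetD_eq_getElem kinds "" h0 (by omega),
        PySem.List.pyGetD_eq_getElem kinds "" (by omega) (by omega)] at hf
    simp only [show (i + 2).toNat = i.toNat + 2 from by omega] at hf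
    rw [List.getD_eq_getElem kinds "" (by omega), List.getD_eq_getElem kinds "" (by omega)]
    exact hf
  · rintro ⟨j, hj, hf⟩
    refine ⟨(j : Int), ⟨by omega, by omega⟩, ?_⟩
    rw [PySem.List.pyGetD_eq_getElem kinds "" (by omega) (by omega),
        PySem.List.pyGetD_eq_getElem kinds "" (by omega) (by omega)]
    simp only [show ((j : Int)).toNat = j from by omega,
      show ((j : Int) + 2).toNat = j + 2 from by omega]
    rw [List.getD_eq_getElem kinds "" (by omega), List.getD_eq_getElem kinds "" (by omega)] at hf
    exact hf

lemma pyGetD_neg1 (kinds : List String) (h : 2 ≤ kinds.length) :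
    PySem.List.pyGetD kinds (-1) "" = kinds.getD (kinds.length - 1) "" := by
  rw [PySem.List.pyGetD_neg_ofNat kinds 1 "" (by omega) (by omega),
      List.getD_eq_getElem kinds "" (by omega)]

lemma pyGetD_neg2 (kinds : List String) (h : 2 ≤ kinds.length) :
    PySem.List.pyGetD kinds (-2) "" = kinds.getD (kinds.length - 2) "" := by
  rw [PySem.List.pyGetD_neg_ofNat kinds 2 "" (by omega) (by omega),
      List.getD_eq_getElem kinds "" (by omega)]

lemma pairBad_d_hl (b : String) (h : PySem.Str.isIn "_l" b = true) : pvPairBad "d" b = true := by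
  simp [pvPairBad, pvHl]
  exact Or.inr (by simpa using h)

lemma pairBad_hr_d (a : String) (h : PySem.Str.isIn "_r" a = true) : pvPairBad a "d" = true := by
  simp [pvPairBad, pvHr]
  exact Or.inl (Or.inl (by simpa using h))

-- the window expression produced by winBad_at, abbreviated for the proofs below
def pvWinExpr (kinds : List String) (j : Nat) : Bool :=
  if j = 0 then
    (pvHl (kinds.getD 0 "") || kinds.getD 0 "" == "ins" ||
      (kinds.getD 0 "" == "d" && kinds.getD 1 "" == "ins")) ||
    pvPairBad (kinds.getD 0 "") (kinds.getD 1 "")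
  else if j + 1 < kinds.length then
    pvPairBad (kinds.getD j "") (kinds.getD (j + 1) "") ||
    (pvHr (kinds.getD (j - 1) "") && pvHl (kinds.getD (j + 1) ""))
  else
    kinds.getD j "" == "d" && kinds.getD (j - 1) "" == "ins"

lemma mk_pair (kinds : List String) (j : Nat) (hj : j + 1 < kinds.length)
    (hp : pvPairBad (kinds.getD j "") (kinds.getD (j + 1) "") = true) :
    ∃ j' : Nat, j' < kinds.length ∧ pvWinExpr kinds j' = true := by
  by_cases h0 : j = 0
  · subst h0
    refine ⟨0, by omega, ?_⟩
    unfold pvWinExpr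
    rw [if_pos rfl]
    simp only [Bool.or_eq_true]
    exact Or.inr (by simpa using hp)
  · refine ⟨j, by omega, ?_⟩
    unfold pvWinExpr
    rw [if_neg h0, if_pos hj]
    simp only [Bool.or_eq_true]
    exact Or.inl hp

lemma A_iff_B (kinds : List String) (hn : 2 ≤ kinds.length) :
    ((PySem.Str.isIn "_l" (PySem.List.pyGetD kinds 0 "") || PySem.List.pyGetD kinds 0 "" == "ins") = true ∨
     (PySem.List.pyGetD kinds 0 "" == "d") = true ∧
       (PySem.Str.isIn "_l" (PySem.List.pyGetD kinds 1 "") || PySem.List.pyGetD kinds 1 "" == "ins") = true ∨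
     ((PySem.List.pyRange 0 ((kinds.length : Int) - 1) 1).any fun i =>
        PySem.Str.isIn "_r" (PySem.List.pyGetD kinds i "") &&
          (PySem.Str.isIn "_l" (PySem.List.pyGetD kinds (i + 1) "") ||
            PySem.List.pyGetD kinds (i + 1) "" == "ins")) = true ∨
     ((PySem.List.pyRange 0 ((kinds.length : Int) - 1) 1).any fun i =>
        PySem.List.pyGetD kinds i "" == "ins" && PySem.Str.isIn "_r" (PySem.List.pyGetD kinds (i + 1) "")) = true ∨
     (PySem.List.pyGetD kinds (-1) "" == "d") = true ∧
       (PySem.Str.isIn "_r" (PySem.List.pyGetD kinds (-2) "") ||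
         PySem.List.pyGetD kinds (-2) "" == "ins") = true ∨
     1 < PySem.List.count kinds "ana_l" + PySem.List.count kinds "ana_r" ∨
     ((PySem.List.pyRange 0 ((kinds.length : Int) - 1) 1).any fun i =>
        PySem.Str.isIn "_r" (PySem.List.pyGetD kinds i "") &&
          PySem.List.pyGetD kinds (i + 1) "" != "lit") = true ∨
     ((PySem.List.pyRange 0 ((kinds.length : Int) - 1) 1).any fun i =>
        PySem.List.pyGetD kinds i "" != "lit" &&
          PySem.Str.isIn "_l" (PySem.List.pyGetD kinds (i + 1) "")) = true ∨
     ((PySem.List.pyRange 0 ((kinds.length : Int) - 2) 1).any fun i =>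
        PySem.Str.isIn "_r" (PySem.List.pyGetD kinds i "") &&
          PySem.Str.isIn "_l" (PySem.List.pyGetD kinds (i + 2) "")) = true ∨
     ((PySem.List.pyRange 0 ((kinds.length : Int) - 1) 1).any fun i =>
        (PySem.Str.isIn "_r" (PySem.List.pyGetD kinds i "") ||
            PySem.List.pyGetD kinds i "" == "ins") &&
          PySem.List.pyGetD kinds (i + 1) "" == "null" ||
        (PySem.Str.isIn "_l" (PySem.List.pyGetD kinds (i + 1) "") ||
            PySem.List.pyGetD kinds (i + 1) "" == "ins") &&
          PySem.List.pyGetD kinds i "" == "null") = true) ↔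
    (1 < PySem.List.count (List.map pvTok kinds) "AL" + PySem.List.count (List.map pvTok kinds) "AR" ∨
     (((("^" :: List.map pvTok kinds).zip (List.map pvTok kinds)).zip
         (List.drop 1 (List.map pvTok kinds) ++ ["$"])).any fun w => pvBadWin w.1.1 w.1.2 w.2) = true) := by
  rw [any1_idx kinds (fun a b => PySem.Str.isIn "_r" a && (PySem.Str.isIn "_l" b || b == "ins")),
      any1_idx kinds (fun a b => a == "ins" && PySem.Str.isIn "_r" b),
      any1_idx kinds (fun a b => PySem.Str.isIn "_r" a && b != "lit"),
      any1_idx kinds (fun a b => a != "lit" && PySem.Str.isIn "_l" b),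
      any2_idx kinds (fun a b => PySem.Str.isIn "_r" a && PySem.Str.isIn "_l" b),
      any1_idx kinds (fun a b =>
        (PySem.Str.isIn "_r" a || a == "ins") && b == "null" ||
        (PySem.Str.isIn "_l" b || b == "ins") && a == "null"),
      any_wins pvBadWin (kinds.map pvTok),
      pyGetD_neg1 kinds hn, pyGetD_neg2 kinds hn,
      count_tok_AL, count_tok_AR]
  simp only [PySem.List.pyGetD_ofNat']
  have hR : (∃ j : Nat, j < (kinds.map pvTok).length ∧
      pvBadWin (if j = 0 then "^" else (kinds.map pvTok).getD (j - 1) "")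
               ((kinds.map pvTok).getD j "")
               (if j + 1 < (kinds.map pvTok).length then (kinds.map pvTok).getD (j + 1) "" else "$") = true) ↔
      (∃ j : Nat, j < kinds.length ∧ pvWinExpr kinds j = true) := by
    simp only [List.length_map]
    exact exists_congr fun j => and_congr_right fun hj => by
      rw [winBad_at kinds hn j hj]; rfl
  rw [hR]
  constructor
  · rintro (h | ⟨hd, hor⟩ | ⟨j, hj, hp⟩ | ⟨j, hj, hp⟩ | ⟨htd, htor⟩ | h | ⟨j, hj, hp⟩ | ⟨j, hj, hp⟩ | ⟨j, hj, hp⟩ | ⟨j, hj, hp⟩)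
    · refine Or.inr ⟨0, by omega, ?_⟩
      unfold pvWinExpr
      rw [if_pos rfl]
      simp only [pvHl] at h ⊢
      simp only [Bool.or_eq_true] at h ⊢
      tauto
    · simp only [Bool.or_eq_true] at hor
      rcases hor with hl1 | hins
      · refine Or.inr (mk_pair kinds 0 (by omega) ?_)
        have hk0 : kinds.getD 0 "" = "d" := by simpa using hd
        rw [hk0]
        exact pairBad_d_hl _ (by simpa using hl1)
      · refine Or.inr ⟨0, by omega, ?_⟩
        unfold pvWinExpr
        rw [if_pos rfl]
        have hb : (kinds.getD 0 "" == "d" && kinds.getD 1 "" == "ins") = true := by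
          rw [Bool.and_eq_true]; exact ⟨hd, hins⟩
        simp only [Bool.or_eq_true] at hb ⊢
        tauto
    · exact Or.inr (mk_pair kinds j hj ((pair_fused_iff _ _).mp (Or.inl hp)))
    · exact Or.inr (mk_pair kinds j hj ((pair_fused_iff _ _).mp (Or.inr (Or.inl hp))))
    · simp only [Bool.or_eq_true] at htor
      rcases htor with hr2 | hins
      · refine Or.inr (mk_pair kinds (kinds.length - 2) (by omega) ?_)
        rw [show kinds.length - 2 + 1 = kinds.length - 1 from by omega]
        have hkl : kinds.getD (kinds.length - 1) "" = "d" := by simpa using htd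
        rw [hkl]
        exact pairBad_hr_d _ hr2
      · refine Or.inr ⟨kinds.length - 1, by omega, ?_⟩
        unfold pvWinExpr
        rw [if_neg (by omega), if_neg (by omega)]
        rw [show kinds.length - 1 - 1 = kinds.length - 2 from by omega]
        rw [Bool.and_eq_true]
        exact ⟨htd, hins⟩
    · exact Or.inl h
    · exact Or.inr (mk_pair kinds j hj ((pair_fused_iff _ _).mp (Or.inr (Or.inr (Or.inl hp)))))
    · exact Or.inr (mk_pair kinds j hj ((pair_fused_iff _ _).mp (Or.inr (Or.inr (Or.inr (Or.inl hp))))))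
    · refine Or.inr ⟨j + 1, by omega, ?_⟩
      unfold pvWinExpr
      rw [if_neg (by omega), if_pos (by omega)]
      simp only [Nat.add_sub_cancel, Bool.or_eq_true]
      exact Or.inr hp
    · exact Or.inr (mk_pair kinds j hj ((pair_fused_iff _ _).mp (Or.inr (Or.inr (Or.inr (Or.inr hp))))))
  · rintro (h | ⟨j, hj, hw⟩)
    · exact Or.inr (Or.inr (Or.inr (Or.inr (Or.inr (Or.inl h)))))
    · unfold pvWinExpr at hw
      by_cases h0 : j = 0
      · rw [if_pos h0] at hw
        rcases Bool.or_eq_true_iff.mp hw with hh | hp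
        · rcases Bool.or_eq_true_iff.mp hh with hh' | hdi
          · refine Or.inl ?_
            simp only [pvHl] at hh'
            simp only [Bool.or_eq_true] at hh' ⊢
            tauto
          · rcases Bool.and_eq_true_iff.mp hdi with ⟨hd, hins⟩
            refine Or.inr (Or.inl ⟨hd, ?_⟩)
            simp only [Bool.or_eq_true]
            exact Or.inr hins
        · rcases (pair_fused_iff _ _).mpr hp with h | h | h | h | h
          · exact Or.inr (Or.inr (Or.inl ⟨0, by omega, h⟩))
          · exact Or.inr (Or.inr (Or.inr (Or.inl ⟨0, by omega, h⟩)))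
          · exact Or.inr (Or.inr (Or.inr (Or.inr (Or.inr (Or.inr (Or.inl ⟨0, by omega, h⟩))))))
          · exact Or.inr (Or.inr (Or.inr (Or.inr (Or.inr (Or.inr (Or.inr (Or.inl ⟨0, by omega, h⟩)))))))
          · exact Or.inr (Or.inr (Or.inr (Or.inr (Or.inr (Or.inr (Or.inr (Or.inr (Or.inr ⟨0, by omega, h⟩))))))))
      · by_cases h1 : j + 1 < kinds.length
        · rw [if_neg h0, if_pos h1] at hw
          simp only [Bool.or_eq_true] at hw
          rcases hw with hp | hd2
          · rcases (pair_fused_iff _ _).mpr hp with h | h | h | h | h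
            · exact Or.inr (Or.inr (Or.inl ⟨j, h1, h⟩))
            · exact Or.inr (Or.inr (Or.inr (Or.inl ⟨j, h1, h⟩)))
            · exact Or.inr (Or.inr (Or.inr (Or.inr (Or.inr (Or.inr (Or.inl ⟨j, h1, h⟩))))))
            · exact Or.inr (Or.inr (Or.inr (Or.inr (Or.inr (Or.inr (Or.inr (Or.inl ⟨j, h1, h⟩)))))))
            · exact Or.inr (Or.inr (Or.inr (Or.inr (Or.inr (Or.inr (Or.inr (Or.inr (Or.inr ⟨j, h1, h⟩))))))))
          · refine Or.inr (Or.inr (Or.inr (Or.inr (Or.inr (Or.inr (Or.inr (Or.inr (Or.inl ⟨j - 1, by omega, ?_⟩))))))))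
            rw [show j - 1 + 2 = j + 1 from by omega]
            exact hd2
        · rw [if_neg h0, if_neg h1] at hw
          rw [show j = kinds.length - 1 from by omega,
              show kinds.length - 1 - 1 = kinds.length - 2 from by omega] at hw
          simp only [Bool.and_eq_true] at hw
          exact Or.inr (Or.inr (Or.inr (Or.inr (Or.inl ⟨hw.1, by simp only [Bool.or_eq_true]; exact Or.inr hw.2⟩))))

lemma main_eq (kinds : List String) : valid_intermediate kinds = valid_intermediate_alt kinds := by
  by_cases hlt : kinds.length < 2
  · have h2 : ((kinds.length : Int)) < 2 := by omega
    simp [valid_intermediate, valid_intermediate_alt, hlt, h2]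
  · have h2 : ¬ ((kinds.length : Int) < 2) := by omega
    have hn : 2 ≤ kinds.length := by omega
    simp only [valid_intermediate, valid_intermediate_alt]
    simp only [if_neg hlt, if_neg h2, if_chain, Bool.decide_coe, Bool.and_true]
    rw [Bool.eq_iff_iff]
    simp only [Bool.and_eq_true, Bool.not_eq_true', Bool.eq_false_iff, ne_eq,
      decide_eq_true_eq, ← not_or]
    exact not_congr (A_iff_B kinds hn)

-- ===== VERDICT (by name: the statement is the Claim_ definition above) =====
theorem valid_intermediate_spec : Claim_equal_valid_intermediate := by
  intro kinds _
  unfold Spec_valid_intermediate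
  exact main_eq kinds
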